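-- pv_equiv track=rewrite | github.com/technoborsch/yandex_algo_training_6.0 | Second/H Openspace/solution.py | solve
-- ===== SOURCE A (Python) =====
-- def solve(n: int, nums: list[int]) -> int:
--     result = None
--     lr_sum = [0]
--     for i, num in enumerate(nums):
--         lr_sum.append(lr_sum[i] + num)
--
--     for i in range(1, len(nums) + 1):
--         lr_sum[i] = lr_sum[i] + lr_sum[i - 1]
--
--     rl_sum = [0]
--     for i in range(len(nums) -1, -1, -1):
--         num = nums[i]
--         rl_sum.append(rl_sum[len(nums) - 1 - i] + num)
--
--     for i in range(1, len(nums) + 1):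
--         rl_sum[i] = rl_sum[i] + rl_sum[i - 1]
--
--     for i in range(len(nums)):
--         moves_left = lr_sum[i] - lr_sum[0]
--         moves_right = rl_sum[len(nums) - 1 - i] - rl_sum[0]
--         moves = moves_left + moves_right
--         if result is None:
--             result = moves
--         elif moves < result:
--             result = moves
--     return result
-- ===== SOURCE B (Python) =====
-- def solve(n: int, nums: list[int]) -> int:
--     result = None
--     for i in range(len(nums)):
--         moves = 0
--         for j in range(len(nums)):
--             moves += nums[j] * abs(i - j)
--         if result is None or moves < result:
--             result = moves
--     return result
-- ===== Notes on version B (the rewrite author's own statement) =====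
-- stated objective: simpler
-- what changed: Replaces A's two scan-built prefix-of-prefix tables (left-to-right and right-to-left) plus a final table-lookup scan with a direct nested double loop computing sum(nums[j]*abs(i-j)) for each candidate i and keeping the running minimum.
-- outside the precondition, e.g. on solve(0, []): A returns None, B returns None
import Mathlib
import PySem

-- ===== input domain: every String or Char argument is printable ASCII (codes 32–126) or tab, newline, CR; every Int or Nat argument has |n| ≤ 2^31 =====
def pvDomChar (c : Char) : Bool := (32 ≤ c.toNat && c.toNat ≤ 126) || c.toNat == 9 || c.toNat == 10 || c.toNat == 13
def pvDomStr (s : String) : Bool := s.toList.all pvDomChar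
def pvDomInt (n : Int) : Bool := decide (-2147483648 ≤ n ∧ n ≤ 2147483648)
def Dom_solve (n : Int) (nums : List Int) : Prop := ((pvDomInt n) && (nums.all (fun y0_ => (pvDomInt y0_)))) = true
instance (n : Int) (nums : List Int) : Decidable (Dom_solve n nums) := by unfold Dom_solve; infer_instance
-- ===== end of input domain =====

-- B replaces A's prefix-of-prefix tables by a direct nested double loop with a running minimum
-- (simpler, structurally different; not faster: O(n^2) vs A's O(n)).


-- ===== PORT A =====
-- Literal port of A.  Every index A uses is in range, so `getD _ _ 0` is exact there.
-- `for i, num in enumerate(nums)` is the fold over `nums.zipIdx` (pairs (num, i)).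
-- A's `result` variable is an Option Int; Python returns None when nums = [] (excluded by
-- Pre_solve), so the port ends with `.getD 0`.
def solve (n : Int) (nums : List Int) : Int :=
  let lr1 := nums.zipIdx.foldl
    (fun acc p => acc ++ [acc.getD p.2 0 + p.1]) [(0 : Int)]
  let lr2 := ((List.range nums.length).map (· + 1)).foldl
    (fun acc i => acc.set i (acc.getD i 0 + acc.getD (i - 1) 0)) lr1
  let rl1 := (List.range nums.length).reverse.foldl
    (fun acc i =>
      let num := nums.getD i 0
      acc ++ [acc.getD (nums.length - 1 - i) 0 + num]) [(0 : Int)]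
  let rl2 := ((List.range nums.length).map (· + 1)).foldl
    (fun acc i => acc.set i (acc.getD i 0 + acc.getD (i - 1) 0)) rl1
  let result := (List.range nums.length).foldl
    (fun (result : Option Int) i =>
      let moves_left := lr2.getD i 0 - lr2.getD 0 0
      let moves_right := rl2.getD (nums.length - 1 - i) 0 - rl2.getD 0 0
      let moves := moves_left + moves_right
      match result with
      | none => some moves
      | some r => if moves < r then some moves else some r) none
  result.getD 0

-- ===== PORT B =====
-- Literal port of Source B: nested double loop, running minimum.
def solve_alt (n : Int) (nums : List Int) : Int :=
  let result := (List.range nums.length).foldl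
    (fun (result : Option Int) (i : Nat) =>
      let moves := (List.range nums.length).foldl
        (fun s j => s + nums.getD j 0 * |(i : Int) - (j : Int)|) 0
      match result with
      | none => some moves
      | some r => if moves < r then some moves else some r) none
  result.getD 0

-- ===== PRECONDITION & SPEC =====
-- Pre_solve excludes only the empty list, on which the Python A returns None instead of an int.
def Pre_solve (n : Int) (nums : List Int) : Prop := nums ≠ []
instance (n : Int) (nums : List Int) : Decidable (Pre_solve n nums) := by unfold Pre_solve; infer_instance
def pvWitness_solve : Int × List Int := (3, [1, 0, 2])
def Spec_solve (n : Int) (nums : List Int) (out : Int) : Prop := out = solve_alt n nums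
instance (n : Int) (nums : List Int) (out : Int) : Decidable (Spec_solve n nums out) := by unfold Spec_solve; infer_instance

-- ===== CLAIM (what is proved, stated in full; the proofs are below) =====
def Claim_equal_solve : Prop := ∀ (n : Int) (nums : List Int), Dom_solve n nums → Pre_solve n nums → Spec_solve n nums (solve n nums)

-- ===== LEMMAS AND PROOFS =====

-- Running sums of a list starting from s: the tail of the list A's append loops build.
def runSums (s : Int) : List Int → List Int
  | [] => []
  | v :: vs => (s + v) :: runSums (s + v) vs

theorem length_runSums (s : Int) (l : List Int) : (runSums s l).length = l.length := by
  induction l generalizing s with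
  | nil => rfl
  | cons v vs ih => simp [runSums, ih]

theorem runSums_getD (s : Int) (l : List Int) (k : Nat) (hk : k < l.length) :
    (runSums s l).getD k 0 = s + (l.take (k + 1)).sum := by
  induction l generalizing s k with
  | nil => simp at hk
  | cons v vs ih =>
    cases k with
    | zero => simp [runSums]
    | succ k' =>
      simp only [runSums, List.getD_cons_succ, List.take_succ_cons, List.sum_cons]
      rw [ih (s + v) k' (by simpa using hk)]; ring

theorem sum_map_range (f : Nat → Int) (n : Nat) :
    ((List.range n).map f).sum = ∑ j ∈ Finset.range n, f j := rfl

theorem getD_last (l : List Int) (h : l ≠ []) : l.getD (l.length - 1) 0 = l.getLast h := by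
  have h1 : l.length - 1 < l.length := by
    have := List.length_pos_iff.mpr h; omega
  rw [List.getLast_eq_getElem, List.getD_eq_getElem?_getD, List.getElem?_eq_getElem h1]
  rfl

-- A's two build loops, generically: each step appends (current last element) + (next value).
theorem foldl_append_last {σ : Type} (f : σ → Int) (idx : σ → Nat) :
    ∀ (l : List σ) (acc : List Int) (hne : acc ≠ []),
      (∀ (k : Nat) (h : k < l.length), idx (l[k]) = acc.length - 1 + k) →
      List.foldl (fun a s => a ++ [a.getD (idx s) 0 + f s]) acc l
        = acc ++ runSums (acc.getLast hne) (l.map f) := by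
  intro l
  induction l with
  | nil => intro acc hne _; simp [runSums]
  | cons hd tl ih =>
    intro acc hne hidx
    have hidx0 : idx hd = acc.length - 1 := by
      have := hidx 0 (by simp); simpa using this
    have hstep : acc.getD (idx hd) 0 = acc.getLast hne := by
      rw [hidx0]; exact getD_last acc hne
    simp only [List.foldl_cons, hstep]
    have hne' : acc ++ [acc.getLast hne + f hd] ≠ [] := by simp
    rw [ih (acc ++ [acc.getLast hne + f hd]) hne' ?_]
    · have hlast : (acc ++ [acc.getLast hne + f hd]).getLast hne' = acc.getLast hne + f hd := by
        simp
      rw [hlast]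
      simp [runSums, List.append_assoc]
    · intro k hk
      have h2 := hidx (k + 1) (by simpa using Nat.succ_lt_succ hk)
      simp only [List.getElem_cons_succ] at h2
      have hpos : 0 < acc.length := List.length_pos_iff.mpr hne
      rw [h2]
      simp only [List.length_append, List.length_cons, List.length_nil]
      omega

-- lr_sum after its build loop
theorem lr1_eq (nums : List Int) :
    nums.zipIdx.foldl (fun acc p => acc ++ [acc.getD p.2 0 + p.1]) [(0 : Int)]
      = 0 :: runSums 0 nums := by
  have h := foldl_append_last (σ := Int × Nat) (fun p => p.1) (fun p => p.2)
      nums.zipIdx [(0 : Int)] (by simp) ?_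
  · simpa [List.zipIdx_map_fst] using h
  · intro k hk
    have hk' : k < nums.length := by simpa using hk
    simp [List.getElem_zipIdx]

theorem map_getD_range (l : List Int) : (List.range l.length).map (fun i => l.getD i 0) = l := by
  apply List.ext_getElem
  · simp
  · intro i h1 h2
    simp [List.getD_eq_getElem?_getD, List.getElem?_eq_getElem h2]

-- rl_sum after its build loop: the same scan, over nums.reverse
theorem rl1_eq (nums : List Int) :
    (List.range nums.length).reverse.foldl
      (fun acc i => acc ++ [acc.getD (nums.length - 1 - i) 0 + nums.getD i 0]) [(0 : Int)]
      = 0 :: runSums 0 nums.reverse := by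
  have h := foldl_append_last (σ := Nat) (fun i => nums.getD i 0) (fun i => nums.length - 1 - i)
      (List.range nums.length).reverse [(0 : Int)] (by simp) ?_
  · rw [h, List.map_reverse, map_getD_range]
    simp
  · intro k hk
    have hk' : k < nums.length := by simpa using hk
    simp only [List.getElem_reverse, List.length_range, List.getElem_range]
    simp
    omega

theorem getD_set (l : List Int) (i j : Nat) (x : Int) :
    (l.set i x).getD j 0 = if i = j ∧ j < l.length then x else l.getD j 0 := by
  rw [List.getD_eq_getElem?_getD, List.getElem?_set]
  split_ifs with h1 h2 h3 <;> simp_all [List.getD_eq_getElem?_getD]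

theorem length_pref_loop (l : List Int) (t : Nat) :
    (((List.range t).map (· + 1)).foldl
        (fun acc i => acc.set i (acc.getD i 0 + acc.getD (i - 1) 0)) l).length = l.length := by
  induction t with
  | zero => simp
  | succ t ih =>
    rw [List.range_succ, List.map_append, List.foldl_append]
    simp only [List.map_cons, List.map_nil, List.foldl_cons, List.foldl_nil, List.length_set]
    exact ih

-- A's in-place prefix-sum loop `for i in range(1, len+1): l[i] += l[i-1]`
theorem pref_loop (l : List Int) (t : Nat) (ht : t < l.length) :
    ∀ (j : Nat),
      (((List.range t).map (· + 1)).foldl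
        (fun acc i => acc.set i (acc.getD i 0 + acc.getD (i - 1) 0)) l).getD j 0
      = if j ≤ t then ∑ k ∈ Finset.range (j + 1), l.getD k 0 else l.getD j 0 := by
  induction t with
  | zero =>
    intro j
    simp only [List.range_zero, List.map_nil, List.foldl_nil]
    by_cases hj : j = 0
    · simp [hj]
    · simp [hj]
  | succ t ih =>
    intro j
    rw [List.range_succ, List.map_append, List.foldl_append]
    simp only [List.map_cons, List.map_nil, List.foldl_cons, List.foldl_nil]
    rw [getD_set, length_pref_loop]
    have iht := ih (by omega)
    by_cases hj : j = t + 1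
    · subst hj
      rw [if_pos ⟨rfl, ht⟩, if_pos (le_refl (t + 1))]
      rw [iht (t + 1), iht (t + 1 - 1)]
      simp only [Nat.add_sub_cancel]
      rw [if_neg (by omega), if_pos (le_refl t), Finset.sum_range_succ (fun k => l.getD k 0) (t + 1)]
      ring
    · rw [if_neg (by tauto), iht j]
      by_cases h2 : j ≤ t
      · rw [if_pos h2, if_pos (by omega)]
      · rw [if_neg h2, if_neg (by omega)]

theorem take_sum (l : List Int) (k : Nat) (hk : k ≤ l.length) :
    (l.take k).sum = ∑ j ∈ Finset.range k, l.getD j 0 := by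
  induction k with
  | zero => simp
  | succ k ih =>
    have hk' : k < l.length := by omega
    rw [Finset.sum_range_succ, ← ih (by omega), List.sum_take_succ _ _ hk']
    simp [List.getD_eq_getElem?_getD, List.getElem?_eq_getElem hk']

-- entries of the un-prefixed table [0] ++ running sums
theorem lget (nums : List Int) (k : Nat) (hk : k ≤ nums.length) :
    (0 :: runSums 0 nums).getD k 0 = ∑ j ∈ Finset.range k, nums.getD j 0 := by
  cases k with
  | zero => simp
  | succ k' =>
    rw [List.getD_cons_succ, runSums_getD 0 nums k' (by omega),
      take_sum nums (k' + 1) (by omega)]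
    ring

-- prefix of prefix sums in closed form
theorem sum_sum (a : Nat → Int) (i : Nat) :
    ∑ k ∈ Finset.range (i + 1), ∑ j ∈ Finset.range k, a j
      = ∑ j ∈ Finset.range i, ((i : Int) - (j : Int)) * a j := by
  induction i with
  | zero => simp
  | succ i ih =>
    rw [Finset.sum_range_succ, ih]
    have h1 : ∑ j ∈ Finset.range (i + 1), (((i + 1 : Nat) : Int) - (j : Int)) * a j
        = ∑ j ∈ Finset.range (i + 1), (((i : Int) - (j : Int)) * a j + a j) :=
      Finset.sum_congr rfl (fun j _ => by push_cast; ring)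
    rw [h1, Finset.sum_add_distrib, Finset.sum_range_succ (fun j => ((i : Int) - (j : Int)) * a j)]
    simp

-- splitting the |i-j|-weighted sum at position i
theorem abs_split (A : Nat → Int) (i m : Nat) :
    ∑ j ∈ Finset.range i, ((i : Int) - j) * A j
      + ∑ j ∈ Finset.range m, ((m : Int) - j) * A (i + m - j)
    = ∑ j ∈ Finset.range (i + 1 + m), A j * |(i : Int) - j| := by
  have e1 : ∑ j ∈ Finset.range i, A j * |(i : Int) - j|
      = ∑ j ∈ Finset.range i, ((i : Int) - j) * A j := by
    refine Finset.sum_congr rfl (fun j hj => ?_)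
    have hj' : j < i := Finset.mem_range.mp hj
    rw [abs_of_nonneg (by omega : (0:Int) ≤ (i : Int) - j)]; ring
  have e2 : ∑ j ∈ Finset.range m, A (i + 1 + j) * |(i : Int) - ((i + 1 + j : Nat) : Int)|
      = ∑ j ∈ Finset.range m, ((j : Int) + 1) * A (i + 1 + j) := by
    refine Finset.sum_congr rfl (fun j hj => ?_)
    have h : |(i : Int) - ((i + 1 + j : Nat) : Int)| = (j : Int) + 1 := by
      rw [abs_sub_comm, abs_of_nonneg (by push_cast; omega)]
      push_cast; ring
    rw [h]; ring
  have e3 : ∑ j ∈ Finset.range m, ((m : Int) - j) * A (i + m - j)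
      = ∑ j ∈ Finset.range m, ((j : Int) + 1) * A (i + 1 + j) := by
    rw [← Finset.sum_range_reflect]
    refine Finset.sum_congr rfl (fun j hj => ?_)
    have hj' : j < m := Finset.mem_range.mp hj
    have ha : i + m - (m - 1 - j) = i + 1 + j := by omega
    have hb : ((m : Nat) : Int) - ((m - 1 - j : Nat) : Int) = (j : Int) + 1 := by
      have h : ((m - 1 - j : Nat) : Int) = (m : Int) - 1 - j := by omega
      rw [h]; ring
    rw [ha, hb]
  rw [Finset.sum_range_add, Finset.sum_range_succ, e1, e2, e3]
  simp

theorem reverse_getD (l : List Int) (j : Nat) (hj : j < l.length) :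
    l.reverse.getD j 0 = l.getD (l.length - 1 - j) 0 := by
  rw [List.getD_eq_getElem?_getD, List.getD_eq_getElem?_getD,
    List.getElem?_eq_getElem (by simpa using hj),
    List.getElem?_eq_getElem (by omega : l.length - 1 - j < l.length)]
  simp [List.getElem_reverse]

theorem solve_eq_solve_alt (n : Int) (nums : List Int) : solve n nums = solve_alt n nums := by
  simp only [solve, solve_alt]
  congr 1
  apply PySem.List.foldl_congr_mem
  intro acc i hi
  have hiN : i < nums.length := List.mem_range.mp hi
  have hlr1len : (0 :: runSums 0 nums).length = nums.length + 1 := by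
    simp [length_runSums]
  have hrl1len : (0 :: runSums 0 nums.reverse).length = nums.length + 1 := by
    simp [length_runSums]
  rw [lr1_eq, rl1_eq]
  have hplr := pref_loop (0 :: runSums 0 nums) nums.length (by omega)
  have hprl := pref_loop (0 :: runSums 0 nums.reverse) nums.length (by omega)
  rw [hplr i, hplr 0, hprl (nums.length - 1 - i), hprl 0]
  rw [if_pos (by omega : i ≤ nums.length), if_pos (by omega : (0:Nat) ≤ nums.length),
      if_pos (by omega : nums.length - 1 - i ≤ nums.length),
      if_pos (by omega : (0:Nat) ≤ nums.length)]
  have hmoves :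
      List.foldl (fun s j => s + nums.getD j 0 * |(i : Int) - (j : Int)|) 0
          (List.range nums.length)
      = (∑ k ∈ Finset.range (i + 1), (0 :: runSums 0 nums).getD k 0
        - ∑ k ∈ Finset.range (0 + 1), (0 :: runSums 0 nums).getD k 0)
      + (∑ k ∈ Finset.range (nums.length - 1 - i + 1), (0 :: runSums 0 nums.reverse).getD k 0
        - ∑ k ∈ Finset.range (0 + 1), (0 :: runSums 0 nums.reverse).getD k 0) := by
    symm
    rw [PySem.List.foldl_add, sum_map_range]
    have z1 : ∑ k ∈ Finset.range (0 + 1), (0 :: runSums 0 nums).getD k 0 = 0 := by simp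
    have z2 : ∑ k ∈ Finset.range (0 + 1), (0 :: runSums 0 nums.reverse).getD k 0 = 0 := by simp
    rw [z1, z2, sub_zero, sub_zero]
    have c1 : ∑ k ∈ Finset.range (i + 1), (0 :: runSums 0 nums).getD k 0
        = ∑ j ∈ Finset.range i, ((i : Int) - j) * nums.getD j 0 := by
      rw [← sum_sum]
      refine Finset.sum_congr rfl (fun k hk => ?_)
      rw [lget nums k (by have := Finset.mem_range.mp hk; omega)]
    set m := nums.length - 1 - i with hm
    have c2 : ∑ k ∈ Finset.range (m + 1), (0 :: runSums 0 nums.reverse).getD k 0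
        = ∑ j ∈ Finset.range m, ((m : Int) - j) * nums.getD (i + m - j) 0 := by
      rw [← sum_sum]
      refine Finset.sum_congr rfl (fun k hk => ?_)
      have hkm : k ≤ m := by have := Finset.mem_range.mp hk; omega
      rw [lget nums.reverse k (by simp; omega)]
      refine Finset.sum_congr rfl (fun j hj => ?_)
      have hjk : j < k := Finset.mem_range.mp hj
      rw [reverse_getD nums j (by omega)]
      congr 1
      omega
    rw [c1, c2, abs_split]
    have h : i + 1 + m = nums.length := by omega
    rw [h, zero_add]
  rw [← hmoves]

-- ===== VERDICT (by name: the statement is the Claim_ definition above) =====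
theorem solve_spec : Claim_equal_solve := by
  intro n nums _ _
  unfold Spec_solve
  exact solve_eq_solve_alt n nums
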